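-- pv_equiv track=rewrite | github.com/AdrienLemaire/Katas | wrap_word/kata_1/wrap.py | create_line
-- ===== SOURCE A (Python) =====
-- def create_line(list_words, col_max):
--     line = ""
--     if len(list_words[0]) > col_max:
--         word = list_words.pop(0)
--         new_word = word[:col_max]
--         list_words.insert(0, word[col_max:])
--         if list_words:
--             new_word += "\n"
--         return new_word, list_words
--     while 1:
--         new_list_words = list(list_words)
--         new_line = line + new_list_words.pop(0)
--         if len(new_line) > col_max:
--             return line + "\n", list_words
--         elif not new_list_words:
--             return new_line, new_list_words
--         else:
--             line = new_line
--             list_words = new_list_words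
-- ===== SOURCE B (Python) =====
-- def create_line(list_words, col_max):
--     # Oversized first word: split it; mutate the caller's list like A does.
--     w = list_words[0]
--     if len(w) > col_max:
--         list_words[0] = w[col_max:]
--         return w[:col_max] + "\n", list_words
--     # Greedy cut: running character total, no intermediate strings or list copies.
--     total = 0
--     for i, word in enumerate(list_words):
--         total += len(word)
--         if total > col_max:
--             return "".join(list_words[:i]) + "\n", list_words[i:]
--     return "".join(list_words), []
-- ===== Notes on version B (the rewrite author's own statement) =====
-- stated objective: faster
-- what changed: Replaces A's while-loop that rebuilds the line string and copies the whole word list on every step with a single pass maintaining only a running character count and an index, doing one final join and one slice at the cut point.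
import Mathlib
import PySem

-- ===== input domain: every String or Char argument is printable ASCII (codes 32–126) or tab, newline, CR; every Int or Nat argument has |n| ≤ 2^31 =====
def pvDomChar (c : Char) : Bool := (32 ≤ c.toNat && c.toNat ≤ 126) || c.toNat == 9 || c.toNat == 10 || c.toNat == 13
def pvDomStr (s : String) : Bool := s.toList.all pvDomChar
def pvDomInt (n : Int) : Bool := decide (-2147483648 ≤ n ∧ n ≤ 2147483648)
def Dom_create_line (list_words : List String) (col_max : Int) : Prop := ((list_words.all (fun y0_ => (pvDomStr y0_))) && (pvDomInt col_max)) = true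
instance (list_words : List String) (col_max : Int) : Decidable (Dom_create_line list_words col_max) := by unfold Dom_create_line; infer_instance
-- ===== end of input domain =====

-- B replaces A's while-loop (rebuilds the line string and copies the word list each step) with a
-- single pass over a running character total plus one final join/slice at the cut index (simpler);
-- equivalence is about the RETURN value only (A's first branch mutates the caller's list; B's
-- Python performs the same mutation).


-- ===== PORT A =====
-- the 'while 1' loop: state = (line, list_words); pop from an empty list is unreachable under Pre_
def create_line_loop (line : String) (list_words : List String) (col_max : Int) : String × List String :=
  match list_words with
  | [] => ("", [])  -- Python would raise here (pop from empty); unreachable from a nonempty start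
  | w :: rest =>
    let new_line := line ++ w
    if PySem.Str.len new_line > col_max then (line ++ "\n", w :: rest)
    else if rest.isEmpty then (new_line, rest)
    else create_line_loop new_line rest col_max

def create_line (list_words : List String) (col_max : Int) : String × List String :=
  match list_words with
  | [] => ("", [])  -- Python raises IndexError on list_words[0]; excluded by Pre_
  | w :: rest =>
    if PySem.Str.len w > col_max then
      let new_word := PySem.Str.slice w none (some col_max)
      let lst := PySem.Str.slice w (some col_max) none :: rest
      (if lst.isEmpty then new_word else new_word ++ "\n", lst)
    else
      create_line_loop "" (w :: rest) col_max

-- ===== PORT B =====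
-- the for-loop over enumerate(list_words): running total and index only
def create_line_alt_go (remaining : List String) (all : List String) (i : Nat) (total : Int) (col_max : Int) : String × List String :=
  match remaining with
  | [] => (PySem.Str.join "" all, [])
  | word :: rest =>
    let total' := total + PySem.Str.len word
    if total' > col_max then
      (PySem.Str.join "" (PySem.List.slice all none (some (i : Int))) ++ "\n",
       PySem.List.slice all (some (i : Int)) none)
    else create_line_alt_go rest all (i + 1) total' col_max

def create_line_alt (list_words : List String) (col_max : Int) : String × List String :=
  match list_words with
  | [] => ("", [])  -- Python raises IndexError on list_words[0]; excluded by Pre_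
  | w :: rest =>
    if PySem.Str.len w > col_max then
      (PySem.Str.slice w none (some col_max) ++ "\n",
       PySem.Str.slice w (some col_max) none :: rest)
    else
      create_line_alt_go (w :: rest) (w :: rest) 0 0 col_max

-- ===== PRECONDITION & SPEC =====
-- Pre_ excludes only the empty list, on which the Python A raises IndexError (list_words[0]).
def Pre_create_line (list_words : List String) (col_max : Int) : Prop := list_words ≠ []
instance (list_words : List String) (col_max : Int) : Decidable (Pre_create_line list_words col_max) := by unfold Pre_create_line; infer_instance
def pvWitness_create_line : List String × Int := (["ab", "cd"], 3)

def Spec_create_line (list_words : List String) (col_max : Int) (out : String × List String) : Prop := out = create_line_alt list_words col_max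
instance (list_words : List String) (col_max : Int) (out : String × List String) : Decidable (Spec_create_line list_words col_max out) := by unfold Spec_create_line; infer_instance

-- ===== CLAIM (what is proved, stated in full; the proofs are below) =====
def Claim_equal_create_line : Prop := ∀ (list_words : List String) (col_max : Int), Dom_create_line list_words col_max → Pre_create_line list_words col_max → Spec_create_line list_words col_max (create_line list_words col_max)

-- ===== LEMMAS AND PROOFS =====

-- "".join concatenates
theorem join_nil_flatten (parts : List (List Char)) : PySem.Chars.join [] parts = parts.flatten := by
  induction parts with
  | nil => simp [PySem.Chars.join_nil]
  | cons a rest ih =>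
    cases rest with
    | nil => simp [PySem.Chars.join_singleton]
    | cons b r => simp [PySem.Chars.join_cons_cons] at ih ⊢; simpa using ih

theorem toList_join_nil (pre : List String) :
    (PySem.Str.join "" pre).toList = (pre.map String.toList).flatten := by
  simp [PySem.Str.toList_join, join_nil_flatten]

theorem string_eq_of_toList (a b : String) (h : a.toList = b.toList) : a = b :=
  String.toList_inj.mp h

-- loop invariant: A's (line, suf) state equals B's (suf, pre ++ suf, |pre|, len line) state
theorem loop_eq_go (suf : List String) : ∀ (pre : List String) (line : String) (col_max : Int),
    suf ≠ [] → line.toList = (pre.map String.toList).flatten →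
    create_line_loop line suf col_max
      = create_line_alt_go suf (pre ++ suf) pre.length (PySem.Str.len line) col_max := by
  induction suf with
  | nil => intro _ _ _ h _; exact absurd rfl h
  | cons w rest ih =>
    intro pre line col_max _ hline
    have hlen : PySem.Str.len (line ++ w) = PySem.Str.len line + PySem.Str.len w := by
      simp [PySem.Str.len_eq]
    have hjoin : PySem.Str.join "" pre = line := by
      apply string_eq_of_toList
      rw [toList_join_nil, hline]
    simp only [create_line_loop, create_line_alt_go, hlen]
    by_cases hov : col_max < (line.length : Int) + (w.length : Int)
    · -- overflow: cut at index |pre|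
      simp [hov, PySem.List.slice_to_natCast, PySem.List.slice_from_natCast, hjoin]
    · cases rest with
      | nil =>
        -- rest empty: everything fits
        have hj : PySem.Str.join "" (pre ++ [w]) = line ++ w := by
          apply string_eq_of_toList
          rw [toList_join_nil]
          simp [hline]
        simp [PySem.Str.len_eq, hov, create_line_alt_go, hj]
      | cons r rs =>
        -- keep going: shift w from suf to pre
        have := ih (pre ++ [w]) (line ++ w) col_max (by simp) (by simp [hline])
        simpa [PySem.Str.len_eq, hov, hlen] using this

-- ===== VERDICT (by name: the statement is the Claim_ definition above) =====
theorem create_line_spec : Claim_equal_create_line := by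
  intro list_words col_max _ hpre
  unfold Spec_create_line
  cases list_words with
  | nil => exact absurd rfl hpre
  | cons w rest =>
    simp only [create_line, create_line_alt]
    split
    · rfl
    · have := loop_eq_go (w :: rest) [] "" col_max (by simp) (by simp [String.toList])
      simpa [PySem.Str.len_eq] using this
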